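-- pv_equiv track=rewrite | github.com/k-harada/AtCoder | ABC/ABC345/A.py | solve
-- ===== SOURCE A (Python) =====
-- def solve(s):
--     if s[0] != "<":
--         return "No"
--     if s[-1] != ">":
--         return "No"
--     for c in s[1:-1]:
--         if c != "=":
--             return "No"
--     return "Yes"
-- ===== SOURCE B (Python) =====
-- def solve(s):
--     return "Yes" if s == "<" + "=" * (len(s) - 2) + ">" else "No"
-- ===== Notes on version B (the rewrite author's own statement) =====
-- stated objective: simpler
-- what changed: B builds the one canonical accepted string '<' + '='*(len(s)-2) + '>' and returns the result of a single equality test, replacing A's guarded per-character early-exit scan.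
import Mathlib
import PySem

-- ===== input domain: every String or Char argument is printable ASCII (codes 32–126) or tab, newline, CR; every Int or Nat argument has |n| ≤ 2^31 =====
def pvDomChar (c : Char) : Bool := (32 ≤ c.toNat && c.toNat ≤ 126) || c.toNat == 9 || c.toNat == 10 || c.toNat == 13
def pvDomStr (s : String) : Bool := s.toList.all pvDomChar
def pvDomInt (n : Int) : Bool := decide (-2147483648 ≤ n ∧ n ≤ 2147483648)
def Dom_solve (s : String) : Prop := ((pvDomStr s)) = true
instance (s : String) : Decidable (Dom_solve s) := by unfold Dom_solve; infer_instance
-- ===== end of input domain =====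

-- B replaces A's guarded per-character scan by building the canonical accepted
-- string and one equality test (objective: simpler).

-- ===== PORT A =====
-- the for-loop over s[1:-1]: early return "No" on a non-'=' char, else "Yes"
def solveLoop : List Char → String
  | [] => "Yes"
  | c :: rest => if c ≠ '=' then "No" else solveLoop rest

def solve (s : String) : String :=
  let cs := s.toList
  match PySem.List.pyGet? cs 0, PySem.List.pyGet? cs (-1) with
  | some c0, some cl =>
    if c0 ≠ '<' then "No"
    else if cl ≠ '>' then "No"
    else solveLoop (PySem.List.slice cs (some 1) (some (-1)))
  | _, _ => "No"   -- IndexError on the empty string: excluded by Pre_solve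

-- ===== PORT B =====
def solve_alt (s : String) : String :=
  if s.toList = '<' :: (List.replicate (s.toList.length - 2) '=' ++ ['>']) then "Yes" else "No"

-- ===== PRECONDITION & SPEC =====
-- Pre_ excludes only the empty string, on which A raises IndexError at s[0].
def Pre_solve (s : String) : Prop := s ≠ ""
instance (s : String) : Decidable (Pre_solve s) := by unfold Pre_solve; infer_instance
def pvWitness_solve : String := "<=>"

def Spec_solve (s : String) (out : String) : Prop := out = solve_alt s
instance (s : String) (out : String) : Decidable (Spec_solve s out) := by unfold Spec_solve; infer_instance

-- ===== CLAIM (what is proved, stated in full; the proofs are below) =====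
def Claim_equal_solve : Prop := ∀ (s : String), Dom_solve s → Pre_solve s → Spec_solve s (solve s)

-- ===== LEMMAS AND PROOFS =====

set_option maxRecDepth 4096

lemma solveLoop_eq (l : List Char) :
    solveLoop l = if (∀ b ∈ l, b = '=') then "Yes" else "No" := by
  induction l with
  | nil => simp [solveLoop]
  | cons c t ih =>
    simp only [solveLoop, ih]
    by_cases hc : c = '='
    · subst hc; simp
    · simp [hc]

lemma key (l : List Char) (h : l ≠ []) :
    (match PySem.List.pyGet? l 0, PySem.List.pyGet? l (-1) with
     | some c0, some cl =>
       if c0 ≠ '<' then "No"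
       else if cl ≠ '>' then "No"
       else solveLoop (PySem.List.slice l (some 1) (some (-1)))
     | _, _ => "No")
    = if l = '<' :: (List.replicate (l.length - 2) '=' ++ ['>']) then "Yes" else "No" := by
  obtain ⟨c0, rest, rfl⟩ := List.exists_cons_of_ne_nil h
  cases rest with
  | nil =>
    -- singleton: A fails the c0='<' / last='>' pair; B compares against a 2-char list
    rw [PySem.List.pyGet?_zero_cons, PySem.List.pyGet?_neg_one]
    simp only [List.getLast?_singleton]
    have hr : ([c0] : List Char) ≠ '<' :: (List.replicate (([c0] : List Char).length - 2) '=' ++ ['>']) := by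
      simp
    rw [if_neg hr]
    by_cases h1 : c0 = '<'
    · subst h1; decide
    · rw [if_pos h1]
  | cons r rs =>
    -- length ≥ 2: write the tail as mid ++ [x]
    have hne : r :: rs ≠ [] := by simp
    obtain ⟨mid, x, hmx⟩ : ∃ mid x, r :: rs = mid ++ [x] := by
      refine ⟨(r :: rs).dropLast, (r :: rs).getLast hne, ?_⟩
      exact (List.dropLast_append_getLast hne).symm
    rw [hmx, PySem.List.pyGet?_zero_cons]
    have hlast : PySem.List.pyGet? (c0 :: (mid ++ [x])) (-1) = some x := by
      rw [PySem.List.pyGet?_neg_one, show c0 :: (mid ++ [x]) = (c0 :: mid) ++ [x] from rfl,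
        List.getLast?_concat]
    rw [hlast]
    dsimp only
    have hslice : PySem.List.slice (c0 :: (mid ++ [x])) (some 1) (some (-1)) = mid := by
      simp only [PySem.List.slice, PySem.List.clampIdx]
      norm_num
      rw [if_neg (show ¬ ((mid.length : Int) + 1 < 0) by omega)]
      simp
    have hlen : (c0 :: (mid ++ [x])).length - 2 = mid.length := by simp
    rw [hslice, solveLoop_eq, hlen]
    have hiff : (c0 :: (mid ++ [x]) = '<' :: (List.replicate mid.length '=' ++ ['>']))
        ↔ (c0 = '<' ∧ (∀ b ∈ mid, b = '=') ∧ x = '>') := by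
      constructor
      · intro hEq
        injection hEq with h1 h2
        obtain ⟨h3, h4⟩ := List.append_inj' h2 (by simp)
        refine ⟨h1, ?_, by simpa using h4⟩
        intro b hb
        rw [h3] at hb
        exact List.eq_of_mem_replicate hb
      · rintro ⟨rfl, hm, rfl⟩
        have : mid = List.replicate mid.length '=' := List.eq_replicate_iff.mpr ⟨rfl, hm⟩
        conv_lhs => rw [this]
    simp only [hiff]
    split_ifs <;> first | rfl | tauto

-- ===== VERDICT (by name: the statement is the Claim_ definition above) =====
theorem solve_spec : Claim_equal_solve := by
  intro s _ hpre
  have h : s.toList ≠ [] := fun h0 => hpre (String.toList_eq_nil_iff.mp h0)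
  unfold Spec_solve solve solve_alt
  exact key s.toList h
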